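-- pv_equiv track=rewrite | github.com/VindereYnetis/Calendar | Calendar.py | program
-- ===== SOURCE A (Python) =====
-- def program(year):
--     january = 31
--     march = 31
--     april = 30
--     may = 31
--     june = 30
--     july = 31
--     august = 31
--     september = 30
--     october = 31
--     november = 30
--     december = 31
--     if (year % 4 == 0):
--         february = 29
--     else: february = 28
--     months = [january, february, march, april, may, june, july, august, september, october, november, december]
--     i = 0
--     result = 0
--     for i in range(len(months)):
--         result += sumMonth(months[i])
--     return result
--
-- def sumMonth(month):
--     i = 1
--     month += 1
--     result = 0
--     for i in range(month):
--         if (month < 10):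
--             result += i
--         else: result += (i // 10) + (i % 10)
--     return result
-- ===== SOURCE B (Python) =====
-- def program(year):
--     # prefix table: pref[k] = sum of digit sums of 0..k, built once
--     pref = [0]
--     for k in range(1, 32):
--         pref.append(pref[-1] + k // 10 + k % 10)
--     february = 29 if year % 4 == 0 else 28
--     months = [31, february, 31, 30, 31, 30, 31, 31, 30, 31, 30, 31]
--     return sum(pref[m] for m in months)
-- ===== Notes on version B (the rewrite author's own statement) =====
-- stated objective: alternative
-- what changed: Replaces the per-month inner loop over every day (re-summing digit values 12 times) with a prefix-sum table pref[k] = digit sums of 0..k built once, then one lookup per month.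
import Mathlib
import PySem

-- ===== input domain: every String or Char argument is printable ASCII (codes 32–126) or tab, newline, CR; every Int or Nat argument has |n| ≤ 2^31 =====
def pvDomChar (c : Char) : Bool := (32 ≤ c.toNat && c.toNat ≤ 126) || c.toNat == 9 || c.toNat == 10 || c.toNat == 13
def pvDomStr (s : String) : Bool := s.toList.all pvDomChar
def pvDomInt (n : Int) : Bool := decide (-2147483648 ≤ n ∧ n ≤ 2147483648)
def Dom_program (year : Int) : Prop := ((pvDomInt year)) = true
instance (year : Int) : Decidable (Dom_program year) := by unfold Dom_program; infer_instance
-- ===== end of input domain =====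

-- B replaces A's per-month inner day loop with a digit-sum prefix table built once plus one lookup per month (alternative decomposition).

-- ===== PORT A =====
def sumMonth (month : Int) : Int :=
  let month := month + 1
  (PySem.List.pyRange 0 month 1).foldl
    (fun result i =>
      if month < 10 then result + i
      else result + (PySem.Int.floordiv i 10 + PySem.Int.mod i 10)) 0

def program (year : Int) : Int :=
  let january : Int := 31
  let march : Int := 31
  let april : Int := 30
  let may : Int := 31
  let june : Int := 30
  let july : Int := 31
  let august : Int := 31
  let september : Int := 30
  let october : Int := 31
  let november : Int := 30
  let december : Int := 31
  let february : Int := if PySem.Int.mod year 4 = 0 then 29 else 28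
  let months : List Int := [january, february, march, april, may, june, july,
    august, september, october, november, december]
  (PySem.List.pyRange 0 (months.length : Int) 1).foldl
    (fun result i => result + sumMonth ((PySem.List.pyGet? months i).getD 0)) 0

-- ===== PORT B =====
def program_alt (year : Int) : Int :=
  let pref : List Int :=
    (PySem.List.pyRange 1 32 1).foldl
      (fun pref k =>
        pref ++ [(PySem.List.pyGet? pref (-1)).getD 0
                  + PySem.Int.floordiv k 10 + PySem.Int.mod k 10]) [0]
  let february : Int := if PySem.Int.mod year 4 = 0 then 29 else 28
  let months : List Int := [31, february, 31, 30, 31, 30, 31, 31, 30, 31, 30, 31]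
  months.foldl (fun s m => s + (PySem.List.pyGet? pref m).getD 0) 0

-- ===== PRECONDITION & SPEC =====
def Spec_program (year : Int) (out : Int) : Prop := out = program_alt year
instance (year : Int) (out : Int) : Decidable (Spec_program year out) := by unfold Spec_program; infer_instance

-- ===== CLAIM (what is proved, stated in full; the proofs are below) =====
def Claim_equal_program : Prop := ∀ (year : Int), Dom_program year → Spec_program year (program year)

-- ===== LEMMAS AND PROOFS =====
theorem program_leap : program 0 = program_alt 0 := by decide
theorem program_common : program 1 = program_alt 1 := by decide

theorem program_mod_cases (year : Int) :
    (program year = if PySem.Int.mod year 4 = 0 then program 0 else program 1)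
    ∧ (program_alt year = if PySem.Int.mod year 4 = 0 then program_alt 0 else program_alt 1) := by
  by_cases h : PySem.Int.mod year 4 = 0 <;>
    simp only [program, program_alt, h] <;> decide

-- ===== VERDICT (by name: the statement is the Claim_ definition above) =====
theorem program_spec : Claim_equal_program := by
  intro year _
  unfold Spec_program
  rcases program_mod_cases year with ⟨ha, hb⟩
  rw [ha, hb]
  by_cases h : PySem.Int.mod year 4 = 0 <;> simp only [h, if_true, if_false, program_leap, program_common]
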